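-- pv_equiv track=rewrite | github.com/chihoon1/Algorithms | frequent_pairs_PCY.py | count_pairs_occurrences
-- ===== SOURCE A (Python) =====
-- def count_pairs_occurrences(pairs, basket_collection):
--     # count occurrences of a pair in pairs list in the basket_collection
--     # param: basket_collection(2D array) where outer array represent a basekt
--     #               and elem in inner array must be an integer representing an item
--     # param: pairs(list of tuples) to be counted for their occurrences
--     # return a dictionary where key=pair, val=count(occurrence)
--     counts = {}
--     for basket in basket_collection:
--         for pair in pairs:
--             if set(pair).issubset(set(basket)):
--                 if counts.get(pair): counts[pair] += 1
--                 else: counts[pair] = 1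
--     return counts
-- ===== SOURCE B (Python) =====
-- def count_pairs_occurrences(pairs, basket_collection):
--     # Collapse duplicate pairs into multiplicities up front, then sweep the
--     # baskets once, building each basket's item set a single time and doing
--     # two membership tests per distinct pair.
--     mult = {}
--     for p in pairs:
--         mult[p] = mult.get(p, 0) + 1
--     counts = {}
--     for basket in basket_collection:
--         items = set(basket)
--         for p, m in mult.items():
--             if p[0] in items and p[1] in items:
--                 counts[p] = counts.get(p, 0) + m
--     return counts
-- ===== Notes on version B (the rewrite author's own statement) =====
-- stated objective: faster
-- what changed: A rebuilds set(basket) and set(pair) and re-runs a subset test for every (basket, pair) combination including duplicate pairs; B first collapses duplicate pairs into a multiplicity table, then builds each basket's set exactly once and adds each distinct pair's multiplicity on two O(1) membership tests.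
import Mathlib
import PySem

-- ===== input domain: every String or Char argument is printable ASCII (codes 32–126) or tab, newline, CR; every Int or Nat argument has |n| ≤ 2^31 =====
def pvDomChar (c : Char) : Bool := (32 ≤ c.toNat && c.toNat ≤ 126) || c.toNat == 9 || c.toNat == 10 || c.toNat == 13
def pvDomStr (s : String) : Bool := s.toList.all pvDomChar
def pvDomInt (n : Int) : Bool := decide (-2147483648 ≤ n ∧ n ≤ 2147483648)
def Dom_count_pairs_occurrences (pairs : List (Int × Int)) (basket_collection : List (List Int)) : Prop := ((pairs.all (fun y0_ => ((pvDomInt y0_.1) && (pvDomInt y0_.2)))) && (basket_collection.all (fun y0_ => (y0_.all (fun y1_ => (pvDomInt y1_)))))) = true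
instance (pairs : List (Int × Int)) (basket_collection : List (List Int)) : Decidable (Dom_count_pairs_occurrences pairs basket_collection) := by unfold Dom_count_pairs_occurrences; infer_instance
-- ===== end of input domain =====

-- B collapses duplicate pairs into a multiplicity table and builds each basket's set once,
-- replacing A's per-(basket,pair) set constructions and subset tests with two membership tests
-- per distinct pair (objective: faster by constant factor).


-- ===== PORT A =====
def count_pairs_occurrences (pairs : List (Int × Int)) (basket_collection : List (List Int)) : List (Int × Int × Int) :=
  let counts := basket_collection.foldl (fun counts basket =>
    pairs.foldl (fun counts pair =>
      if PySem.Set.issubset (PySem.Set.ofList [pair.1, pair.2]) (PySem.Set.ofList basket) then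
        match counts.get? pair with
        | some v => if v ≠ 0 then counts.insert pair (v + 1) else counts.insert pair 1
        | none => counts.insert pair 1
      else counts) counts) (PySem.Dict.empty : PySem.Dict (Int × Int) Int)
  counts.items.map (fun kv => (kv.1.1, kv.1.2, kv.2))

-- ===== PORT B =====
def count_pairs_occurrences_alt (pairs : List (Int × Int)) (basket_collection : List (List Int)) : List (Int × Int × Int) :=
  let mult := pairs.foldl (fun d p => d.insert p (d.getD p 0 + 1)) (PySem.Dict.empty : PySem.Dict (Int × Int) Int)
  let counts := basket_collection.foldl (fun counts basket =>
    let items := PySem.Set.ofList basket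
    mult.items.foldl (fun counts pm =>
      if PySem.Set.contains items pm.1.1 && PySem.Set.contains items pm.1.2 then
        counts.insert pm.1 (counts.getD pm.1 0 + pm.2)
      else counts) counts) (PySem.Dict.empty : PySem.Dict (Int × Int) Int)
  counts.items.map (fun kv => (kv.1.1, kv.1.2, kv.2))

-- ===== PRECONDITION & SPEC =====
def Spec_count_pairs_occurrences (pairs : List (Int × Int)) (basket_collection : List (List Int)) (out : List (Int × Int × Int)) : Prop := out = count_pairs_occurrences_alt pairs basket_collection
instance (pairs : List (Int × Int)) (basket_collection : List (List Int)) (out : List (Int × Int × Int)) : Decidable (Spec_count_pairs_occurrences pairs basket_collection out) := by unfold Spec_count_pairs_occurrences; infer_instance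

-- ===== CLAIM (what is proved, stated in full; the proofs are below) =====
def Claim_equal_count_pairs_occurrences : Prop := ∀ (pairs : List (Int × Int)) (basket_collection : List (List Int)), Dom_count_pairs_occurrences pairs basket_collection → Spec_count_pairs_occurrences pairs basket_collection (count_pairs_occurrences pairs basket_collection)

-- ===== LEMMAS AND PROOFS =====

-- Shared vocabulary: p "hits" basket b when both components occur in b; pvFh/pvH are the index of
-- the first hit basket (bs.length if none) and the number of hit baskets; pvCanon is the common
-- canonical value of both programs' dict item lists: for each basket index i in order, the distinct
-- pairs first hit at basket i (in first-occurrence order) with count = multiplicity × hit baskets.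
def pvHit (b : List Int) (p : Int × Int) : Bool := b.contains p.1 && b.contains p.2
def pvCnt (pairs : List (Int × Int)) (p : Int × Int) : Int := (pairs.count p : Int)
def pvFh (bs : List (List Int)) (p : Int × Int) : Nat := bs.findIdx (fun b => pvHit b p)
def pvH (bs : List (List Int)) (p : Int × Int) : Nat := bs.countP (fun b => pvHit b p)
def pvBucket (pairs : List (Int × Int)) (bs : List (List Int)) (i : Nat) : List ((Int × Int) × Int) :=
  ((PySem.Set.ofList pairs).filter (fun p => pvFh bs p == i)).map
    (fun p => (p, pvCnt pairs p * (pvH bs p : Int)))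
def pvCanon (pairs : List (Int × Int)) (bs : List (List Int)) : List ((Int × Int) × Int) :=
  (List.range bs.length).flatMap (pvBucket pairs bs)

lemma subset_eq_hit (b : List Int) (p : Int × Int) :
    PySem.Set.issubset (PySem.Set.ofList [p.1, p.2]) (PySem.Set.ofList b) = pvHit b p := by
  rw [Bool.eq_iff_iff, PySem.Set.issubset_iff]
  simp only [pvHit, Bool.and_eq_true, List.contains_iff_mem, PySem.Set.mem_ofList,
    List.mem_cons, List.not_mem_nil, or_false]
  constructor
  · intro hc; exact ⟨hc p.1 (Or.inl rfl), hc p.2 (Or.inr rfl)⟩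
  · rintro ⟨h1, h2⟩ x hx
    rcases hx with hx | hx <;> subst hx <;> assumption

def pvAstep (b : List Int) (d : PySem.Dict (Int × Int) Int) (p : Int × Int) : PySem.Dict (Int × Int) Int :=
  if pvHit b p then
    match d.get? p with
    | some v => if v ≠ 0 then d.insert p (v + 1) else d.insert p 1
    | none => d.insert p 1
  else d

lemma pvAstep_not_hit (b d p) (h : pvHit b p = false) : pvAstep b d p = d := by
  simp [pvAstep, h]
lemma pvAstep_some (b d p v) (h : pvHit b p = true) (hg : PySem.Dict.get? d p = some v) (hv : v ≠ 0) :
    pvAstep b d p = d.insert p (v + 1) := by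
  simp [pvAstep, h, hg, hv]
lemma pvAstep_none (b d p) (h : pvHit b p = true) (hg : PySem.Dict.get? d p = none) :
    pvAstep b d p = d.insert p 1 := by
  simp [pvAstep, h, hg]

-- the filter-side helper: dropping p from the set when p cannot pass the goal-side predicate
lemma filter_discard_congr (s : List (Int × Int)) (p : Int × Int)
    (q q' : (Int × Int) → Bool) (hq : ∀ x, x ≠ p → q x = q' x) :
    (PySem.Set.discard s p).filter q = s.filter (fun x => (!(x == p)) && q' x) := by
  show (s.filter (fun y => !(y == p))).filter q = _
  rw [List.filter_filter]
  apply List.filter_congr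
  intro x hx
  by_cases he : x = p
  · simp [he]
  · rw [hq x he]; cases q' x <;> simp

lemma filter_side (b : List Int) (t : List (Int × Int)) (p : Int × Int)
    (d d' : PySem.Dict (Int × Int) Int)
    (hd : ∀ x, x ≠ p → d'.contains x = d.contains x)
    (hp2 : (pvHit b p && !(d'.contains p)) = false) :
    ((PySem.Set.ofList t).filter (fun x => pvHit b x && !(d'.contains x))).map
        (fun x => (x, (t.count x : Int)))
    = ((PySem.Set.discard (PySem.Set.ofList t) p).filter (fun x => pvHit b x && !(d.contains x))).map
        (fun x => (x, ((p :: t).count x : Int))) := by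
  rw [filter_discard_congr (PySem.Set.ofList t) p _
      (fun x => pvHit b x && !(d'.contains x)) (fun x hx => by simp only [hd x hx])]
  rw [show ((PySem.Set.ofList t).filter
        (fun x => (!(x == p)) && (pvHit b x && !(d'.contains x))))
      = ((PySem.Set.ofList t).filter (fun x => pvHit b x && !(d'.contains x))) from ?feq]
  case feq =>
    apply List.filter_congr
    intro x hx
    by_cases hxp : x = p
    · subst hxp; simp [hp2]
    · have hbe : (x == p) = false := by simpa using hxp
      simp [hbe]
  apply List.map_congr_left
  intro x hx
  rw [List.mem_filter] at hx
  rcases hx with ⟨hx1, hx2⟩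
  have hbe : (x == p) = false := by
    by_cases hxp : x = p
    · exfalso; subst hxp; rw [hx2] at hp2; simp at hp2
    · simpa using hxp
  have hep : ¬ p = x := by intro h; subst h; simp at hbe
  simp [List.count_cons, hep]

lemma A_inner' (b : List Int) (l : List (Int × Int)) (d : PySem.Dict (Int × Int) Int)
    (hnd : d.keys.Nodup) (hpos : ∀ kv ∈ d.items, 0 < kv.2) :
    (l.foldl (pvAstep b) d).items
    = d.items.map (fun kv => (kv.1, kv.2 + if pvHit b kv.1 then (l.count kv.1 : Int) else 0))
      ++ ((PySem.Set.ofList l).filter (fun p => pvHit b p && !(d.contains p))).map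
          (fun p => (p, (l.count p : Int))) := by
  induction l generalizing d with
  | nil => simp
  | cons p t ih =>
    rw [List.foldl_cons]
    by_cases hp : pvHit b p = true
    · cases hg : d.get? p with
      | some v =>
        have hkv : (p, v) ∈ d.items := PySem.Dict.mem_items_of_get?_eq_some d hg
        have hv : v ≠ 0 := by have := hpos (p, v) hkv; simp at this; omega
        have hc : d.contains p = true := by
          rw [PySem.Dict.contains_eq_isSome_get?, hg]; rfl
        have hpos' : ∀ kv ∈ (d.insert p (v+1)).items, 0 < kv.2 := by
          intro kv hkv'
          rw [PySem.Dict.mem_items_insert] at hkv'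
          rcases hkv' with h | ⟨h, _⟩
          · subst h; have := hpos (p, v) hkv; simp at this ⊢; omega
          · exact hpos kv h
        rw [pvAstep_some b d p v hp hg hv,
          ih (d.insert p (v+1)) (PySem.Dict.nodup_keys_insert d p _ hnd) hpos',
          PySem.Dict.items_insert_of_contains d _ hc]
        congr 1
        · rw [List.map_map]
          apply List.map_congr_left
          intro kv hkv2
          by_cases he : kv.1 = p
          · have hgk : d.get? kv.1 = some kv.2 := by
              rcases kv with ⟨k, w⟩
              exact PySem.Dict.get?_of_mem_items d hkv2 hnd
            rw [he, hg] at hgk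
            have hv2 : kv.2 = v := by injection hgk with h; omega
            have hbe : (kv.1 == p) = true := by simpa using he
            simp only [Function.comp_apply, hbe, if_pos, he, hv2, hp, List.count_cons_self]
            simp [Prod.ext_iff, hp]; ring
          · have hbe : (kv.1 == p) = false := by simpa using he
            have hep : ¬ p = kv.1 := fun h => he h.symm
            simp only [Function.comp_apply, hbe, Bool.false_eq_true, if_false]
            simp [List.count_cons, hep]
        · rw [PySem.Set.ofList_cons, List.filter_cons]
          have hpred : (pvHit b p && !d.contains p) = false := by simp [hp, hc]
          rw [hpred]
          simp only [Bool.false_eq_true, if_false]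
          exact filter_side b t p d (d.insert p (v+1))
            (fun x hx => by
              have hbe : (x == p) = false := by simpa using hx
              simp [PySem.Dict.contains_insert, hbe])
            (by simp [PySem.Dict.contains_insert_self])
      | none =>
        have hc : d.contains p = false := by
          rw [PySem.Dict.contains_eq_isSome_get?, hg]; rfl
        have hpos' : ∀ kv ∈ (d.insert p 1).items, 0 < kv.2 := by
          intro kv hkv'
          rw [PySem.Dict.mem_items_insert] at hkv'
          rcases hkv' with h | ⟨h, _⟩
          · subst h; simp
          · exact hpos kv h
        rw [pvAstep_none b d p hp hg,
          ih (d.insert p 1) (PySem.Dict.nodup_keys_insert d p _ hnd) hpos',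
          PySem.Dict.items_insert_of_not_contains d _ hc,
          List.map_append, List.append_assoc]
        congr 1
        · apply List.map_congr_left
          intro kv hkv2
          have he : kv.1 ≠ p := by
            intro h
            have : d.contains kv.1 = true := by
              rw [PySem.Dict.contains_iff_mem_keys]
              exact PySem.Dict.mem_keys_of_mem_items d hkv2
            rw [h, hc] at this; exact Bool.false_ne_true this
          have hep : ¬ p = kv.1 := fun h => he h.symm
          simp [List.count_cons, hep]
        · rw [PySem.Set.ofList_cons, List.filter_cons]
          have hpred : (pvHit b p && !d.contains p) = true := by simp [hp, hc]
          rw [hpred]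
          simp only [if_true, List.map_cons, List.map_nil, List.nil_append, List.singleton_append]
          have hhead : ((p, 1 + if pvHit b p = true then ((List.count p t : Nat) : Int) else 0) : (Int × Int) × Int)
              = (p, ((List.count p (p :: t) : Nat) : Int)) := by
            simp [Prod.ext_iff, hp, List.count_cons_self]; push_cast; ring
          rw [hhead]
          congr 1
          exact filter_side b t p d (d.insert p 1)
              (fun x hx => by
                have hbe : (x == p) = false := by simpa using hx
                simp [PySem.Dict.contains_insert, hbe])
              (by simp [PySem.Dict.contains_insert_self])
    · have hpf : pvHit b p = false := by simpa using hp
      rw [pvAstep_not_hit b d p hpf, ih d hnd hpos]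
      congr 1
      · apply List.map_congr_left
        intro kv hkv2
        by_cases hh : pvHit b kv.1 = true
        · have he : kv.1 ≠ p := by
            intro h; rw [h, hpf] at hh; exact Bool.false_ne_true hh
          have hep : ¬ p = kv.1 := fun h => he h.symm
          simp [hh, List.count_cons, hep]
        · have hhf : pvHit b kv.1 = false := by simpa using hh
          simp [hhf]
      · rw [PySem.Set.ofList_cons, List.filter_cons]
        have hpred : (pvHit b p && !d.contains p) = false := by simp [hpf]
        rw [hpred]
        simp only [Bool.false_eq_true, if_false]
        exact filter_side b t p d d (fun x _ => rfl) (by simp [hpf])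

lemma canon_keys (pairs : List (Int × Int)) (bs : List (List Int)) :
    (pvCanon pairs bs).map Prod.fst
    = (List.range bs.length).flatMap
        (fun i => (PySem.Set.ofList pairs).filter (fun p => pvFh bs p == i)) := by
  rw [pvCanon, List.map_flatMap]
  congr 1
  funext i
  rw [pvBucket, List.map_map]
  simp [Function.comp_def]

lemma canon_keys_nodup (pairs : List (Int × Int)) (bs : List (List Int)) :
    ((pvCanon pairs bs).map Prod.fst).Nodup := by
  rw [canon_keys, List.nodup_flatMap]
  refine ⟨fun i _ => (PySem.Set.nodup_ofList pairs).filter _, ?_⟩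
  apply List.Pairwise.imp ?_ (List.pairwise_lt_range)
  intro i j hij x hxi hxj
  rw [List.mem_filter] at hxi hxj
  rcases hxi with ⟨_, hi⟩; rcases hxj with ⟨_, hj⟩
  rw [beq_iff_eq] at hi hj
  omega

lemma mem_canon_keys (pairs : List (Int × Int)) (bs : List (List Int)) (p : Int × Int) :
    p ∈ (pvCanon pairs bs).map Prod.fst ↔ p ∈ PySem.Set.ofList pairs ∧ pvFh bs p < bs.length := by
  rw [canon_keys]
  simp only [List.mem_flatMap, List.mem_filter, List.mem_range, beq_iff_eq]
  constructor
  · rintro ⟨i, hi, hp, he⟩; exact ⟨hp, by omega⟩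
  · rintro ⟨hp, hlt⟩; exact ⟨pvFh bs p, hlt, hp, rfl⟩

lemma canon_pos (pairs : List (Int × Int)) (bs : List (List Int)) :
    ∀ kv ∈ pvCanon pairs bs, 0 < kv.2 := by
  intro kv hkv
  rw [pvCanon] at hkv
  simp only [List.mem_flatMap, List.mem_range, pvBucket, List.mem_map, List.mem_filter,
    beq_iff_eq] at hkv
  obtain ⟨i, hi, p, ⟨hp, hfh⟩, rfl⟩ := hkv
  have h1 : 0 < pairs.count p := List.count_pos_iff.mpr (by simpa using hp)
  have h2 : 0 < pvH bs p := by
    rw [pvFh] at hfh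
    have hlt : List.findIdx (fun b => pvHit b p) bs < bs.length := by omega
    obtain ⟨x, hx, hpx⟩ := List.findIdx_lt_length.mp hlt
    rw [pvH]
    rcases Nat.eq_zero_or_pos (bs.countP (fun b => pvHit b p)) with h | h
    · exact absurd hpx (List.countP_eq_zero.mp h x hx)
    · exact h
  have : (0 : Int) < pvCnt pairs p := by rw [pvCnt]; exact_mod_cast h1
  exact mul_pos this (by exact_mod_cast h2)

lemma findIdx_single (b : List Int) (p : Int × Int) :
    List.findIdx (fun x => pvHit x p) [b] = if pvHit b p then 0 else 1 := by
  by_cases h : pvHit b p = true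
  · simp [List.findIdx_cons, h]
  · simp only [Bool.not_eq_true] at h; simp [List.findIdx_cons, h]

lemma fh_append (bs : List (List Int)) (b : List Int) (p : Int × Int) :
    pvFh (bs ++ [b]) p
      = if pvFh bs p < bs.length then pvFh bs p
        else (if pvHit b p then 0 else 1) + bs.length := by
  rw [pvFh, List.findIdx_append, ← findIdx_single b p]
  rfl

lemma H_append (bs : List (List Int)) (b : List Int) (p : Int × Int) :
    pvH (bs ++ [b]) p = pvH bs p + (if pvHit b p then 1 else 0) := by
  rw [pvH, pvH, List.countP_append]
  congr 1
  by_cases h : pvHit b p = true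
  · simp [List.countP_cons, h]
  · simp only [Bool.not_eq_true] at h; simp [List.countP_cons, h]

lemma H_zero (bs : List (List Int)) (p : Int × Int) (h : ¬ pvFh bs p < bs.length) :
    pvH bs p = 0 := by
  rw [pvH, List.countP_eq_zero]
  have : List.findIdx (fun x => pvHit x p) bs = bs.length :=
    Nat.le_antisymm List.findIdx_le_length (by rw [pvFh] at h; omega)
  exact fun a ha => by simpa using List.findIdx_eq_length.mp this a ha

lemma canon_step (pairs : List (Int × Int)) (bs : List (List Int)) (b : List Int) :
    pvCanon pairs (bs ++ [b])
    = (pvCanon pairs bs).map (fun kv => (kv.1, kv.2 + if pvHit b kv.1 then pvCnt pairs kv.1 else 0))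
      ++ ((PySem.Set.ofList pairs).filter
            (fun p => pvHit b p && !(decide (pvFh bs p < bs.length)))).map
          (fun p => (p, pvCnt pairs p)) := by
  rw [pvCanon, pvCanon, List.map_flatMap]
  have hlen : (bs ++ [b]).length = bs.length + 1 := by simp
  rw [hlen, List.range_succ, List.flatMap_append, List.flatMap_singleton]
  congr 1
  · apply List.flatMap_congr
    intro i hi
    rw [List.mem_range] at hi
    rw [pvBucket, pvBucket, List.map_map]
    have hfil : ((PySem.Set.ofList pairs).filter (fun p => pvFh (bs ++ [b]) p == i))
        = ((PySem.Set.ofList pairs).filter (fun p => pvFh bs p == i)) := by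
      apply List.filter_congr
      intro x _
      rw [Bool.eq_iff_iff, beq_iff_eq, beq_iff_eq, fh_append]
      by_cases hlt : pvFh bs x < bs.length
      · simp [hlt]
      · have : pvFh bs x = bs.length := by
          rw [pvFh] at *; have := List.findIdx_le_length (p := fun x_1 => pvHit x_1 x) (xs := bs); omega
        by_cases hh : pvHit b x = true <;> simp [hlt, hh] <;> omega
    rw [hfil]
    apply List.map_congr_left
    intro x hx
    rw [H_append]
    by_cases hh : pvHit b x = true
    · simp only [Function.comp_apply, hh, if_true, Prod.mk.injEq, true_and]
      push_cast; ring
    · have hhf : pvHit b x = false := by simpa using hh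
      simp [hhf]
  · -- bucket at index bs.length
    rw [pvBucket]
    have hfil : ((PySem.Set.ofList pairs).filter (fun p => pvFh (bs ++ [b]) p == bs.length))
        = ((PySem.Set.ofList pairs).filter
            (fun p => pvHit b p && !(decide (pvFh bs p < bs.length)))) := by
      apply List.filter_congr
      intro x _
      rw [Bool.eq_iff_iff, beq_iff_eq, fh_append]
      by_cases hlt : pvFh bs x < bs.length
      · simp [hlt]; omega
      · by_cases hh : pvHit b x = true <;> simp [hlt, hh]
    rw [hfil]
    apply List.map_congr_left
    intro x hx
    rw [List.mem_filter] at hx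
    rcases hx with ⟨_, hx2⟩
    rw [Bool.and_eq_true] at hx2
    rcases hx2 with ⟨hh, hnlt⟩
    have hnlt' : ¬ pvFh bs x < bs.length := by simpa using hnlt
    rw [H_append, H_zero bs x hnlt', hh]
    simp

lemma A_items' (pairs : List (Int × Int)) (bs : List (List Int)) :
    (bs.foldl (fun c bk => pairs.foldl (pvAstep bk) c)
      (PySem.Dict.empty : PySem.Dict (Int × Int) Int)).items = pvCanon pairs bs := by
  induction bs using List.reverseRecOn with
  | nil => simp [pvCanon, PySem.Dict.empty]
  | append_singleton bs b ih =>
    rw [List.foldl_append, List.foldl_cons, List.foldl_nil]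
    have hkeys : (bs.foldl (fun c bk => pairs.foldl (pvAstep bk) c)
        (PySem.Dict.empty : PySem.Dict (Int × Int) Int)).keys = (pvCanon pairs bs).map Prod.fst := by
      show _ = _
      rw [show (bs.foldl (fun c bk => pairs.foldl (pvAstep bk) c)
        (PySem.Dict.empty : PySem.Dict (Int × Int) Int)).keys
        = ((bs.foldl (fun c bk => pairs.foldl (pvAstep bk) c)
          (PySem.Dict.empty : PySem.Dict (Int × Int) Int)).items.map Prod.fst) from rfl, ih]
    have hnd : (bs.foldl (fun c bk => pairs.foldl (pvAstep bk) c)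
        (PySem.Dict.empty : PySem.Dict (Int × Int) Int)).keys.Nodup := by
      rw [hkeys]; exact canon_keys_nodup pairs bs
    have hpos : ∀ kv ∈ (bs.foldl (fun c bk => pairs.foldl (pvAstep bk) c)
        (PySem.Dict.empty : PySem.Dict (Int × Int) Int)).items, 0 < kv.2 := by
      rw [ih]; exact canon_pos pairs bs
    generalize hD : (List.foldl (fun c bk => List.foldl (pvAstep bk) c pairs)
        (PySem.Dict.empty : PySem.Dict (Int × Int) Int) bs) = D at ih hnd hpos hkeys ⊢
    rw [A_inner' b pairs D hnd hpos, ih, canon_step]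
    simp only [pvCnt]
    congr 1
    have hfil : ((PySem.Set.ofList pairs).filter (fun p => pvHit b p && !(D.contains p)))
        = ((PySem.Set.ofList pairs).filter
            (fun p => pvHit b p && !(decide (pvFh bs p < bs.length)))) := by
      apply List.filter_congr
      intro x hx1
      have hmem : (x ∈ D.keys) ↔ (pvFh bs x < bs.length) := by
        rw [hkeys, mem_canon_keys]; simp [hx1]
      rw [PySem.Dict.contains_eq_decide_mem_keys]
      simp [hmem]
    rw [hfil]

lemma set_hit (b : List Int) (p : Int × Int) :
    (PySem.Set.contains (PySem.Set.ofList b) p.1 && PySem.Set.contains (PySem.Set.ofList b) p.2)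
      = pvHit b p := by
  rw [Bool.eq_iff_iff]
  simp [pvHit, PySem.Set.contains_iff, List.contains_iff_mem, PySem.Set.mem_ofList]

-- ===== B-side: the multiplicity-table sweep =====

-- first-match lookup in a key-value list, default 0
def pvLk (l : List ((Int × Int) × Int)) (k : Int × Int) : Int :=
  ((l.find? (fun pm => pm.1 == k)).map Prod.snd).getD 0

def pvBstep (b : List Int) (d : PySem.Dict (Int × Int) Int) (pm : (Int × Int) × Int) : PySem.Dict (Int × Int) Int :=
  if pvHit b pm.1 then d.insert pm.1 (d.getD pm.1 0 + pm.2) else d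

lemma pvLk_cons_self (p : Int × Int) (m : Int) (t : List ((Int × Int) × Int)) :
    pvLk ((p, m) :: t) p = m := by
  simp [pvLk, List.find?_cons]

lemma pvLk_cons_ne (p k : Int × Int) (m : Int) (t : List ((Int × Int) × Int)) (h : k ≠ p) :
    pvLk ((p, m) :: t) k = pvLk t k := by
  have : ((p, m).1 == k) = false := by simpa using fun hc => h hc.symm
  simp [pvLk, List.find?_cons, this]

lemma pvLk_of_not_mem (t : List ((Int × Int) × Int)) (p : Int × Int)
    (h : p ∉ t.map Prod.fst) : pvLk t p = 0 := by
  have : t.find? (fun pm => pm.1 == p) = none := by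
    rw [List.find?_eq_none]
    intro x hx hc
    exact h (List.mem_map.mpr ⟨x, hx, beq_iff_eq.mp hc⟩)
  simp [pvLk, this]

lemma B_inner (b : List Int) (l : List ((Int × Int) × Int)) (d : PySem.Dict (Int × Int) Int)
    (hnd : (l.map Prod.fst).Nodup) (hndd : d.keys.Nodup) :
    (l.foldl (pvBstep b) d).items
    = d.items.map (fun kv => (kv.1, kv.2 + if pvHit b kv.1 then pvLk l kv.1 else 0))
      ++ l.filter (fun pm => pvHit b pm.1 && !(d.contains pm.1)) := by
  induction l generalizing d with
  | nil =>
    simp only [List.foldl_nil, List.filter_nil, List.append_nil]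
    conv_lhs => rw [← List.map_id d.items]
    apply List.map_congr_left
    intro kv _
    have : pvLk [] kv.1 = 0 := by simp [pvLk]
    simp [this]
  | cons pmh t ih =>
    obtain ⟨p, m⟩ := pmh
    rw [List.foldl_cons]
    have hndt : (t.map Prod.fst).Nodup := by
      rw [List.map_cons] at hnd; exact hnd.of_cons
    have hpnott : p ∉ t.map Prod.fst := by
      rw [List.map_cons] at hnd; exact (List.nodup_cons.mp hnd).1
    by_cases hp : pvHit b p = true
    · have hstep : pvBstep b d (p, m) = d.insert p (d.getD p 0 + m) := by
        simp [pvBstep, hp]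
      rw [hstep, ih (d.insert p (d.getD p 0 + m)) hndt (PySem.Dict.nodup_keys_insert d p _ hndd)]
      by_cases hc : d.contains p = true
      · rw [PySem.Dict.items_insert_of_contains d _ hc, List.map_map]
        rw [List.filter_cons]
        have hpred : (pvHit b p && !(d.contains p)) = false := by simp [hp, hc]
        rw [hpred]
        simp only [Bool.false_eq_true, if_false]
        congr 1
        · apply List.map_congr_left
          intro kv hkv
          by_cases he : kv.1 = p
          · have hbe : (kv.1 == p) = true := by simpa using he
            have hgd : d.getD p 0 = kv.2 := by
              rcases kv with ⟨k, w⟩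
              simp only at he
              subst he
              exact PySem.Dict.getD_of_mem_items d hkv hndd 0
            have hlkt : pvLk t p = 0 := pvLk_of_not_mem t p hpnott
            simp only [Function.comp_apply, hbe, if_pos, hgd]
            rw [he, pvLk_cons_self, hp]
            simp [hlkt]
          · have hbe : (kv.1 == p) = false := by simpa using he
            simp only [Function.comp_apply, hbe, Bool.false_eq_true, if_false]
            rw [pvLk_cons_ne p kv.1 m t he]
        · apply List.filter_congr
          intro pm hpm
          have hne : pm.1 ≠ p := by
            intro hc2
            exact hpnott (by rw [← hc2]; exact List.mem_map.mpr ⟨pm, hpm, rfl⟩)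
          have hbe : (pm.1 == p) = false := by simpa using hne
          simp [PySem.Dict.contains_insert, hbe]
      · have hcf : d.contains p = false := by simpa using hc
        have hgd : d.getD p 0 = 0 := PySem.Dict.getD_of_not_contains d 0 hcf
        rw [hgd, PySem.Dict.items_insert_of_not_contains d _ hcf,
          List.map_append, List.append_assoc]
        rw [List.filter_cons]
        have hpred : (pvHit b p && !(d.contains p)) = true := by simp [hp, hcf]
        rw [hpred]
        simp only [if_true]
        congr 1
        · apply List.map_congr_left
          intro kv hkv
          have hne : kv.1 ≠ p := by
            intro hc2
            have : d.contains kv.1 = true := by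
              rw [PySem.Dict.contains_iff_mem_keys]
              exact PySem.Dict.mem_keys_of_mem_items d hkv
            rw [hc2, hcf] at this
            exact Bool.false_ne_true this
          rw [pvLk_cons_ne p kv.1 m t hne]
        · have hlkt : pvLk t p = 0 := pvLk_of_not_mem t p hpnott
          simp only [List.map_cons, List.map_nil, List.singleton_append]
          congr 1
          · rw [hp]
            simp [hlkt]
          · apply List.filter_congr
            intro pm hpm
            have hne : pm.1 ≠ p := by
              intro hc2
              exact hpnott (by rw [← hc2]; exact List.mem_map.mpr ⟨pm, hpm, rfl⟩)
            have hbe : (pm.1 == p) = false := by simpa using hne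
            simp [PySem.Dict.contains_insert, hbe]
    · have hpf : pvHit b p = false := by simpa using hp
      have hstep : pvBstep b d (p, m) = d := by simp [pvBstep, hpf]
      rw [hstep, ih d hndt hndd, List.filter_cons]
      have hpred : (pvHit b p && !(d.contains p)) = false := by simp [hpf]
      rw [hpred]
      simp only [Bool.false_eq_true, if_false]
      congr 1
      apply List.map_congr_left
      intro kv hkv
      by_cases he : kv.1 = p
      · rw [he, hpf]
        simp
      · rw [pvLk_cons_ne p kv.1 m t he]

-- pvLk over the counter's item list is the count for members, 0 otherwise
lemma pvLk_counter (pairs : List (Int × Int)) (k : Int × Int) (h : k ∈ PySem.Set.ofList pairs) :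
    pvLk ((PySem.Dict.counter pairs).items) k = pvCnt pairs k := by
  rw [PySem.Dict.items_counter]
  have hnd := PySem.Set.nodup_ofList pairs
  revert h hnd
  generalize PySem.Set.ofList pairs = s
  intro h hnd
  induction s with
  | nil => cases h
  | cons x t ih =>
    rw [List.map_cons]
    by_cases he : k = x
    · subst he
      rw [pvLk_cons_self]
      rfl
    · rw [pvLk_cons_ne x k _ _ he]
      rcases List.mem_cons.mp h with hx | hx
      · exact absurd hx he
      · exact ih hx hnd.of_cons

lemma counter_keys_nodup (pairs : List (Int × Int)) :
    (((PySem.Dict.counter pairs).items).map Prod.fst).Nodup := by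
  rw [PySem.Dict.items_counter, List.map_map]
  have : ((fun k : Int × Int => (k, (pairs.count k : Int))) ∘ id) = (fun k => (k, (pairs.count k : Int))) := rfl
  simp only [Function.comp_def]
  simpa using PySem.Set.nodup_ofList pairs

lemma B_items' (pairs : List (Int × Int)) (bs : List (List Int)) :
    (bs.foldl (fun c bk => ((PySem.Dict.counter pairs).items).foldl (pvBstep bk) c)
      (PySem.Dict.empty : PySem.Dict (Int × Int) Int)).items = pvCanon pairs bs := by
  induction bs using List.reverseRecOn with
  | nil => simp [pvCanon, PySem.Dict.empty]
  | append_singleton bs b ih =>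
    rw [List.foldl_append, List.foldl_cons, List.foldl_nil]
    have hkeys : (bs.foldl (fun c bk => ((PySem.Dict.counter pairs).items).foldl (pvBstep bk) c)
        (PySem.Dict.empty : PySem.Dict (Int × Int) Int)).keys = (pvCanon pairs bs).map Prod.fst := by
      show _ = _
      rw [show (bs.foldl (fun c bk => ((PySem.Dict.counter pairs).items).foldl (pvBstep bk) c)
        (PySem.Dict.empty : PySem.Dict (Int × Int) Int)).keys
        = ((bs.foldl (fun c bk => ((PySem.Dict.counter pairs).items).foldl (pvBstep bk) c)
          (PySem.Dict.empty : PySem.Dict (Int × Int) Int)).items.map Prod.fst) from rfl, ih]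
    have hnd : (bs.foldl (fun c bk => ((PySem.Dict.counter pairs).items).foldl (pvBstep bk) c)
        (PySem.Dict.empty : PySem.Dict (Int × Int) Int)).keys.Nodup := by
      rw [hkeys]; exact canon_keys_nodup pairs bs
    generalize hD : (List.foldl (fun c bk => ((PySem.Dict.counter pairs).items).foldl (pvBstep bk) c)
        (PySem.Dict.empty : PySem.Dict (Int × Int) Int) bs) = D at ih hnd hkeys ⊢
    rw [B_inner b ((PySem.Dict.counter pairs).items) D (counter_keys_nodup pairs) hnd, ih, canon_step]
    congr 1
    · apply List.map_congr_left
      intro kv hkv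
      have hmem : kv.1 ∈ PySem.Set.ofList pairs := by
        have : kv.1 ∈ (pvCanon pairs bs).map Prod.fst := List.mem_map.mpr ⟨kv, hkv, rfl⟩
        exact ((mem_canon_keys pairs bs kv.1).mp this).1
      by_cases hh : pvHit b kv.1 = true
      · rw [hh]
        simp only [if_true]
        rw [pvLk_counter pairs kv.1 hmem]
      · have hhf : pvHit b kv.1 = false := by simpa using hh
        simp [hhf]
    · rw [PySem.Dict.items_counter, List.filter_map]
      have hfil : ((PySem.Set.ofList pairs).filter
            ((fun pm : (Int × Int) × Int => pvHit b pm.1 && !(D.contains pm.1))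
              ∘ (fun k => (k, (pairs.count k : Int)))))
          = ((PySem.Set.ofList pairs).filter
              (fun p => pvHit b p && !(decide (pvFh bs p < bs.length)))) := by
        apply List.filter_congr
        intro x hx1
        have hmem : (x ∈ D.keys) ↔ (pvFh bs x < bs.length) := by
          rw [hkeys, mem_canon_keys]; simp [hx1]
        simp only [Function.comp_apply]
        rw [PySem.Dict.contains_eq_decide_mem_keys]
        simp [hmem]
      rw [hfil]
      simp [pvCnt]

lemma A_items (pairs : List (Int × Int)) (bs : List (List Int)) :
    (bs.foldl (fun counts basket =>
      pairs.foldl (fun counts pair =>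
        if PySem.Set.issubset (PySem.Set.ofList [pair.1, pair.2]) (PySem.Set.ofList basket) then
          match counts.get? pair with
          | some v => if v ≠ 0 then counts.insert pair (v + 1) else counts.insert pair 1
          | none => counts.insert pair 1
        else counts) counts) (PySem.Dict.empty : PySem.Dict (Int × Int) Int)).items
    = pvCanon pairs bs := by
  rw [show (fun (counts : PySem.Dict (Int × Int) Int) (basket : List Int) =>
      pairs.foldl (fun counts pair =>
        if PySem.Set.issubset (PySem.Set.ofList [pair.1, pair.2]) (PySem.Set.ofList basket) then
          match counts.get? pair with
          | some v => if v ≠ 0 then counts.insert pair (v + 1) else counts.insert pair 1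
          | none => counts.insert pair 1
        else counts) counts)
    = (fun counts basket => pairs.foldl (pvAstep basket) counts) from ?hfun]
  case hfun =>
    funext c bk
    congr 1
    funext d p
    rw [subset_eq_hit]
    rfl
  exact A_items' pairs bs

lemma B_items (pairs : List (Int × Int)) (bs : List (List Int)) :
    count_pairs_occurrences_alt pairs bs
      = (pvCanon pairs bs).map (fun kv => (kv.1.1, kv.1.2, kv.2)) := by
  have hmult : pairs.foldl (fun d p => d.insert p (d.getD p 0 + 1))
      (PySem.Dict.empty : PySem.Dict (Int × Int) Int) = PySem.Dict.counter pairs :=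
    PySem.Dict.foldl_insert_getD_add_one_eq_counter pairs
  have hport : count_pairs_occurrences_alt pairs bs
      = (bs.foldl (fun counts basket =>
          ((PySem.Dict.counter pairs).items).foldl (fun counts pm =>
            if PySem.Set.contains (PySem.Set.ofList basket) pm.1.1
                && PySem.Set.contains (PySem.Set.ofList basket) pm.1.2 then
              counts.insert pm.1 (counts.getD pm.1 0 + pm.2)
            else counts) counts) (PySem.Dict.empty : PySem.Dict (Int × Int) Int)).items.map
        (fun kv => (kv.1.1, kv.1.2, kv.2)) := by
    rw [count_pairs_occurrences_alt, hmult]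
  rw [hport]
  rw [show (fun (counts : PySem.Dict (Int × Int) Int) (basket : List Int) =>
      ((PySem.Dict.counter pairs).items).foldl (fun counts pm =>
        if PySem.Set.contains (PySem.Set.ofList basket) pm.1.1
            && PySem.Set.contains (PySem.Set.ofList basket) pm.1.2 then
          counts.insert pm.1 (counts.getD pm.1 0 + pm.2)
        else counts) counts)
    = (fun counts basket => ((PySem.Dict.counter pairs).items).foldl (pvBstep basket) counts) from ?hfun]
  case hfun =>
    funext c bk
    congr 1
    funext d pm
    rw [set_hit]
    rfl
  rw [B_items' pairs bs]

-- ===== VERDICT (by name: the statement is the Claim_ definition above) =====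
theorem count_pairs_occurrences_spec : Claim_equal_count_pairs_occurrences := by
  intro pairs bs _
  show _ = _
  rw [count_pairs_occurrences, B_items]
  simp only [A_items]
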